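-- pv_equiv track=rewrite | github.com/Zhaoli2042/GoldDIGR | plugins/xtb-freq-tsopt-irc-wbo/scripts/compute_sco_wbo_stats.py | collect_bond_event_frames
-- ===== SOURCE A (Python) =====
-- from typing import Set, Tuple
--
-- def collect_bond_event_frames(reactive_bonds: dict) -> Tuple[Set[int], Set[int], Set[int]]:
--     """
--     From reactive_bonds, build three sets of frames:
--
--         top1_frames: union of rank-1 frames across all bonds
--         top2_frames: union of rank-1 and rank-2 frames
--         top3_frames: union of rank-1, rank-2, and rank-3 frames
--
--     We assume that for each bond:
--         bond_info["top_slope_events"] is a list sorted by descending |slope|.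
--     """
--     top1_frames: Set[int] = set()
--     top2_frames: Set[int] = set()
--     top3_frames: Set[int] = set()
--
--     for bond_name, bond_info in reactive_bonds.items():
--         events = bond_info.get("top_slope_events", [])
--         for rank, ev in enumerate(events):
--             frame = ev.get("frame")
--             if frame is None:
--                 continue
--
--             # rank 0 = top1; 1 = top2; 2 = top3
--             if rank == 0:
--                 top1_frames.add(frame)
--                 top2_frames.add(frame)
--                 top3_frames.add(frame)
--             elif rank == 1:
--                 top2_frames.add(frame)
--                 top3_frames.add(frame)
--             elif rank == 2:
--                 top3_frames.add(frame)
--             # ignore any events beyond rank-3 if present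
--
--     return top1_frames, top2_frames, top3_frames
-- ===== SOURCE B (Python) =====
-- def frames_of(events):
--     return [ev["frame"] for ev in events if ev.get("frame") is not None]
--
--
-- def collect_bond_event_frames(reactive_bonds):
--     """Union top-1/2/3 ranked event frames across bonds via prefix slices:
--     top1 from events[:1], top2 from events[:2], top3 from events[:3] —
--     no per-element rank branching (top1 ⊆ top2 ⊆ top3 is encoded by the prefixes)."""
--     top1, top2, top3 = set(), set(), set()
--     for bond_info in reactive_bonds.values():
--         events = bond_info.get("top_slope_events", [])
--         top1.update(frames_of(events[:1]))
--         top2.update(frames_of(events[:2]))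
--         top3.update(frames_of(events[:3]))
--     return top1, top2, top3
-- ===== Notes on version B (the rewrite author's own statement) =====
-- stated objective: simpler
-- what changed: Replaces the rank==0/1/2 branch ladder inside an enumerate loop with three prefix slices events[:1]/[:2]/[:3] whose frames are unioned into the running sets, relying on the nesting top1⊆top2⊆top3.
import Mathlib
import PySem

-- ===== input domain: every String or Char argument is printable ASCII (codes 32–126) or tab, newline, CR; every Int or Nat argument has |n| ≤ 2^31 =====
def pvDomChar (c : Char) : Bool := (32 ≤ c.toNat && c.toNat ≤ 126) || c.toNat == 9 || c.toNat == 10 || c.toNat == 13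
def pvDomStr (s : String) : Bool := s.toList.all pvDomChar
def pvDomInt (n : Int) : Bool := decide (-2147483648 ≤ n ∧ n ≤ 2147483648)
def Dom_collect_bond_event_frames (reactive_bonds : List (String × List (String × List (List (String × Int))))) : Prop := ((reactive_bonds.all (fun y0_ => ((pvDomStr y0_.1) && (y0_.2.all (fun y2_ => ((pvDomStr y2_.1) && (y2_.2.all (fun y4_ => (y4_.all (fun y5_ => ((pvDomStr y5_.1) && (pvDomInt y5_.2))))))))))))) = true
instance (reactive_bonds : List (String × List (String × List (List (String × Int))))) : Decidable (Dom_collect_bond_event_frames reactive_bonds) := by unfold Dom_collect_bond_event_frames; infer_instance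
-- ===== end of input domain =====

-- B replaces A's rank==0/1/2 branch ladder with unions over the prefix slices events[:1]/[:2]/[:3] (objective: simpler).

-- ===== PORT A =====
-- one step of A's inner 'for rank, ev in enumerate(events)' loop
def cbefStep (acc : List Int × List Int × List Int) (re : Int × List (String × Int)) :
    List Int × List Int × List Int :=
  match PySem.Dict.get? ⟨re.2⟩ "frame" with
  | none => acc
  | some frame =>
    if re.1 = 0 then
      (PySem.Set.add acc.1 frame, PySem.Set.add acc.2.1 frame, PySem.Set.add acc.2.2 frame)
    else if re.1 = 1 then
      (acc.1, PySem.Set.add acc.2.1 frame, PySem.Set.add acc.2.2 frame)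
    else if re.1 = 2 then
      (acc.1, acc.2.1, PySem.Set.add acc.2.2 frame)
    else acc

def collect_bond_event_frames (reactive_bonds : List (String × List (String × List (List (String × Int))))) : List Int × List Int × List Int :=
  reactive_bonds.foldl
    (fun acc bond =>
      let events := PySem.Dict.getD ⟨bond.2⟩ "top_slope_events" []
      (PySem.List.enumerate events).foldl cbefStep acc)
    (PySem.Set.empty, PySem.Set.empty, PySem.Set.empty)

-- ===== PORT B =====
-- [ev["frame"] for ev in events if ev.get("frame") is not None]
def cbefFramesOf (events : List (List (String × Int))) : List Int :=
  events.filterMap (fun ev => PySem.Dict.get? ⟨ev⟩ "frame")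

def collect_bond_event_frames_alt (reactive_bonds : List (String × List (String × List (List (String × Int))))) : List Int × List Int × List Int :=
  reactive_bonds.foldl
    (fun acc bond =>
      let events := PySem.Dict.getD ⟨bond.2⟩ "top_slope_events" []
      (PySem.Set.update acc.1 (cbefFramesOf (PySem.List.slice events none (some 1))),
       PySem.Set.update acc.2.1 (cbefFramesOf (PySem.List.slice events none (some 2))),
       PySem.Set.update acc.2.2 (cbefFramesOf (PySem.List.slice events none (some 3)))))
    (PySem.Set.empty, PySem.Set.empty, PySem.Set.empty)

-- ===== PRECONDITION & SPEC =====
def Spec_collect_bond_event_frames (reactive_bonds : List (String × List (String × List (List (String × Int))))) (out : List Int × List Int × List Int) : Prop := out = collect_bond_event_frames_alt reactive_bonds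
instance (reactive_bonds : List (String × List (String × List (List (String × Int))))) (out : List Int × List Int × List Int) : Decidable (Spec_collect_bond_event_frames reactive_bonds out) := by unfold Spec_collect_bond_event_frames; infer_instance

-- ===== CLAIM (what is proved, stated in full; the proofs are below) =====
def Claim_equal_collect_bond_event_frames : Prop := ∀ (reactive_bonds : List (String × List (String × List (List (String × Int))))), Dom_collect_bond_event_frames reactive_bonds → Spec_collect_bond_event_frames reactive_bonds (collect_bond_event_frames reactive_bonds)

-- ===== LEMMAS AND PROOFS =====

-- events beyond rank 2 never change A's accumulator
lemma cbef_tail_noop (rest : List (List (String × Int))) (s : Int) (acc : List Int × List Int × List Int)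
    (h : 3 ≤ s) : (PySem.List.enumerate rest s).foldl cbefStep acc = acc := by
  induction rest generalizing s acc with
  | nil => simp [PySem.List.enumerate]
  | cons e t ih =>
    have h0 : s ≠ 0 := by omega
    have h1 : s ≠ 1 := by omega
    have h2 : s ≠ 2 := by omega
    simp only [PySem.List.enumerate, List.foldl_cons]
    have hstep : cbefStep acc (s, e) = acc := by
      unfold cbefStep
      cases PySem.Dict.get? ⟨e⟩ "frame" <;> simp [h0, h1, h2]
    rw [hstep, ih _ _ (by omega)]

-- one bond: A's ranked loop equals B's three prefix updates
lemma cbef_bond_eq (events : List (List (String × Int))) (acc : List Int × List Int × List Int) :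
    (PySem.List.enumerate events).foldl cbefStep acc =
      (PySem.Set.update acc.1 (cbefFramesOf (PySem.List.slice events none (some 1))),
       PySem.Set.update acc.2.1 (cbefFramesOf (PySem.List.slice events none (some 2))),
       PySem.Set.update acc.2.2 (cbefFramesOf (PySem.List.slice events none (some 3)))) := by
  rw [PySem.List.slice_to events (by norm_num), PySem.List.slice_to events (by norm_num),
      PySem.List.slice_to events (by norm_num)]
  match events with
  | [] =>
    simp [PySem.List.enumerate, cbefFramesOf, PySem.Set.update]
  | [a] =>
    cases ha : PySem.Dict.get? ⟨a⟩ "frame" <;>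
      simp [PySem.List.enumerate, cbefStep, cbefFramesOf, PySem.Set.update, ha]
  | [a, b] =>
    cases ha : PySem.Dict.get? ⟨a⟩ "frame" <;> cases hb : PySem.Dict.get? ⟨b⟩ "frame" <;>
      simp [PySem.List.enumerate, cbefStep, cbefFramesOf, PySem.Set.update, ha, hb]
  | a :: b :: c :: rest =>
    have htail : ∀ acc', (PySem.List.enumerate rest 3).foldl cbefStep acc' = acc' :=
      fun acc' => cbef_tail_noop rest 3 acc' le_rfl
    simp only [PySem.List.enumerate, List.foldl_cons]
    norm_num
    rw [htail]
    cases ha : PySem.Dict.get? ⟨a⟩ "frame" <;> cases hb : PySem.Dict.get? ⟨b⟩ "frame" <;>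
        cases hc : PySem.Dict.get? ⟨c⟩ "frame" <;>
      simp [cbefStep, cbefFramesOf, PySem.Set.update, ha, hb, hc]

-- the two outer folds agree from any accumulator
lemma cbef_foldl_eq (rb : List (String × List (String × List (List (String × Int)))))
    (acc : List Int × List Int × List Int) :
    rb.foldl (fun acc bond =>
        (PySem.List.enumerate (PySem.Dict.getD ⟨bond.2⟩ "top_slope_events" [])).foldl cbefStep acc) acc =
    rb.foldl (fun acc bond =>
        let events := PySem.Dict.getD ⟨bond.2⟩ "top_slope_events" []
        (PySem.Set.update acc.1 (cbefFramesOf (PySem.List.slice events none (some 1))),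
         PySem.Set.update acc.2.1 (cbefFramesOf (PySem.List.slice events none (some 2))),
         PySem.Set.update acc.2.2 (cbefFramesOf (PySem.List.slice events none (some 3))))) acc := by
  induction rb generalizing acc with
  | nil => rfl
  | cons b t ih =>
    simp only [List.foldl_cons]
    rw [cbef_bond_eq]
    exact ih _

-- ===== VERDICT (by name: the statement is the Claim_ definition above) =====
theorem collect_bond_event_frames_spec : Claim_equal_collect_bond_event_frames := by
  intro rb _
  unfold Spec_collect_bond_event_frames collect_bond_event_frames collect_bond_event_frames_alt
  exact cbef_foldl_eq rb _
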